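-- pv_equiv track=rewrite | github.com/pitkwiecien/ZadaniaPythonTrojki | Zadanie 3.py | get_max_divisors
-- ===== SOURCE A (Python) =====
-- from typing import List
--
-- def disassemble(number: int, found_divisors: tuple = ()) -> List[int]:
--     new_found_divisors = list(found_divisors)
--     broken = False
--     for i in range(2, number):
--         if number % i == 0:
--             new_found_divisors.append(i)
--             new_found_divisors = disassemble(round(number / i), tuple(new_found_divisors))
--             broken = True
--             break
--     if not broken:
--         new_found_divisors.append(number)
--     return new_found_divisors
--
-- def get_max_divisors(from_list):
--     max_divisors = 0
--     for item in from_list: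
--         disassembled = disassemble(item)
--         divisors = len(disassembled)
--         if divisors > max_divisors:
--             max_divisors = divisors
--     return max_divisors
-- ===== SOURCE B (Python) =====
-- def get_max_divisors(from_list):
--     best = 0
--     for n in from_list:
--         if n < 2:
--             cnt = 1
--         else:
--             cnt = 0
--             m = n
--             d = 2
--             while d * d <= m:
--                 if m % d == 0:
--                     m //= d
--                     cnt += 1
--                 else:
--                     d += 1
--             cnt += 1
--         if cnt > best:
--             best = cnt
--     return best
-- ===== Notes on version B (the rewrite author's own statement) =====
-- stated objective: faster
-- what changed: Replaces A's recursive smallest-divisor search scanning 2..n-1 with list accumulation by a single iterative trial-division loop up to sqrt(m) that only counts factors.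
import Mathlib
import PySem

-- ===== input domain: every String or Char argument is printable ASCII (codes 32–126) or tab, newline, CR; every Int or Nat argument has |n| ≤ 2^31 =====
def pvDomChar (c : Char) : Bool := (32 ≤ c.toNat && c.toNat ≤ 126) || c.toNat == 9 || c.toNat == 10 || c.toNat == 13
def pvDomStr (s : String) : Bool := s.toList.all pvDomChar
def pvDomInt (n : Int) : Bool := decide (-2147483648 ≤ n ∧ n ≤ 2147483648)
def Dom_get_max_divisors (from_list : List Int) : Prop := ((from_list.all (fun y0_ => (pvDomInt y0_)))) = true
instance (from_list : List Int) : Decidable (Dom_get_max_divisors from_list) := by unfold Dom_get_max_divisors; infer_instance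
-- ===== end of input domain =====

-- B replaces A's recursive smallest-divisor search (scanning 2..n-1 and building a factor list)
-- by one iterative trial-division loop up to sqrt(m) that only counts factors (objective: faster).

-- ===== PORT A =====
-- 'for i in range(2, number): if number % i == 0: … break' = scan i = 2,3,… for (number-2).toNat steps
def pyFirstDiv (n i : Int) (fuel : Nat) : Option Int :=
  match fuel with
  | 0 => none
  | Nat.succ f => if PySem.Int.mod n i = 0 then some i else pyFirstDiv n (i + 1) f

-- recursion of 'disassemble', made structural by a fuel that is proved sufficient (fuel > number.toNat at
-- every call, see disF_irrel/disA_some below); round(number / i) is exact division here, ported as floordiv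
def disF (fuel : Nat) (number : Int) (found : List Int) : List Int :=
  match fuel with
  | 0 => found
  | Nat.succ f =>
    match pyFirstDiv number 2 (number - 2).toNat with
    | some i => disF f (PySem.Int.floordiv number i) (found ++ [i])
    | none => found ++ [number]

def disassembleA (number : Int) (found : List Int) : List Int :=
  disF (number.toNat + 1) number found

def get_max_divisors (from_list : List Int) : Int :=
  from_list.foldl (fun max_divisors item =>
    let divisors : Int := ((disassembleA item []).length : Int)
    if divisors > max_divisors then divisors else max_divisors) 0

-- ===== PORT B =====
-- the single trial-division while-loop of Source B, made structural by a fuel that is proved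
-- sufficient ((m + 1 - d).toNat < fuel at every call, see bLoopF_eq below)
def bLoopF (fuel : Nat) (m d cnt : Int) : Int :=
  match fuel with
  | 0 => cnt
  | Nat.succ f =>
    if d * d ≤ m then
      if PySem.Int.mod m d = 0 then
        bLoopF f (PySem.Int.floordiv m d) d (cnt + 1)
      else
        bLoopF f m (d + 1) cnt
    else cnt

def cntB (n : Int) : Int :=
  if n < 2 then 1 else bLoopF ((n - 1).toNat + 1) n 2 0 + 1

def get_max_divisors_alt (from_list : List Int) : Int :=
  from_list.foldl (fun best n =>
    let cnt := cntB n
    if cnt > best then cnt else best) 0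

-- ===== PRECONDITION & SPEC =====
def Spec_get_max_divisors (from_list : List Int) (out : Int) : Prop := out = get_max_divisors_alt from_list
instance (from_list : List Int) (out : Int) : Decidable (Spec_get_max_divisors from_list out) := by unfold Spec_get_max_divisors; infer_instance

-- ===== CLAIM (what is proved, stated in full; the proofs are below) =====
def Claim_equal_get_max_divisors : Prop := ∀ (from_list : List Int), Dom_get_max_divisors from_list → Spec_get_max_divisors from_list (get_max_divisors from_list)

-- ===== LEMMAS AND PROOFS =====

theorem pyFirstDiv_some_facts : ∀ (fuel : Nat) (n i d : Int),
    pyFirstDiv n i fuel = some d → i ≤ d ∧ d < i + fuel ∧ PySem.Int.mod n d = 0 := by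
  intro fuel
  induction fuel with
  | zero => intro n i d h; simp [pyFirstDiv] at h
  | succ f ih =>
    intro n i d h
    simp only [pyFirstDiv] at h
    split_ifs at h with h0
    · obtain rfl : i = d := by simpa using h
      exact ⟨le_refl _, by push_cast; omega, h0⟩
    · obtain ⟨h1, h2, h3⟩ := ih n (i + 1) d h
      exact ⟨by omega, by push_cast at h2 ⊢; omega, h3⟩

theorem quot_bounds {n d : Int} (hn : 2 ≤ n) (hd2 : 2 ≤ d) (hdn : d < n) (hdvd : d ∣ n) :
    1 ≤ n / d ∧ n / d < n := by
  obtain ⟨c, hc⟩ := hdvd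
  have hq : n / d = c := by rw [hc]; exact Int.mul_ediv_cancel_left c (by omega)
  have hc1 : 1 ≤ c := by nlinarith
  have hc2 : c < n := by nlinarith
  omega

-- the quotient step of disassemble: bounds needed to show the fuel stays sufficient
theorem step_bounds {n i : Int} (h : pyFirstDiv n 2 (n - 2).toNat = some i) :
    3 ≤ n ∧ 2 ≤ i ∧ i < n ∧ PySem.Int.floordiv n i = n / i ∧ 1 ≤ n / i ∧ n / i < n := by
  obtain ⟨h1, h2, h3⟩ := pyFirstDiv_some_facts _ _ _ _ h
  have hn3 : 3 ≤ n := by by_contra hc; push_neg at hc; omega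
  have hin : i < n := by omega
  have hdvd : i ∣ n := (PySem.Int.mod_eq_zero_iff_dvd n i).mp h3
  have hb := quot_bounds (by omega : (2:Int) ≤ n) h1 hin hdvd
  exact ⟨hn3, h1, hin, PySem.Int.floordiv_eq_ediv_of_pos (by omega), hb.1, hb.2⟩

-- any sufficient fuel computes the same disassemble result
theorem disF_irrel : ∀ (f1 : Nat), ∀ (f2 : Nat) (n : Int) (found : List Int),
    n.toNat < f1 → n.toNat < f2 → disF f1 n found = disF f2 n found := by
  intro f1
  induction f1 with
  | zero => intro f2 n found h1 _; omega
  | succ f ih =>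
    intro f2 n found h1 h2
    cases f2 with
    | zero => omega
    | succ g =>
      simp only [disF]
      cases h : pyFirstDiv n 2 (n - 2).toNat with
      | none => rfl
      | some i =>
        obtain ⟨hn3, hi2, hin, hfl, hq1, hq2⟩ := step_bounds h
        exact ih g (PySem.Int.floordiv n i) (found ++ [i])
          (by rw [hfl]; omega) (by rw [hfl]; omega)

theorem disA_some {n i : Int} (h : pyFirstDiv n 2 (n - 2).toNat = some i) (found : List Int) :
    disassembleA n found = disassembleA (PySem.Int.floordiv n i) (found ++ [i]) := by
  obtain ⟨hn3, hi2, hin, hfl, hq1, hq2⟩ := step_bounds h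
  unfold disassembleA
  have hu : disF (n.toNat + 1) n found
      = disF n.toNat (PySem.Int.floordiv n i) (found ++ [i]) := by
    simp only [disF, h]
  rw [hu]
  exact disF_irrel _ _ _ _ (by rw [hfl]; omega) (by rw [hfl]; omega)

theorem disA_none {n : Int} (h : pyFirstDiv n 2 (n - 2).toNat = none) (found : List Int) :
    disassembleA n found = found ++ [n] := by
  unfold disassembleA
  simp only [disF, h]

theorem pyFirstDiv_none_of : ∀ (fuel : Nat) (n i : Int),
    (∀ e, i ≤ e → e < i + fuel → PySem.Int.mod n e ≠ 0) → pyFirstDiv n i fuel = none := by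
  intro fuel
  induction fuel with
  | zero => intro n i _; rfl
  | succ f ih =>
    intro n i h
    simp only [pyFirstDiv]
    rw [if_neg (h i (le_refl _) (by push_cast; omega))]
    exact ih n (i + 1) (fun e he1 he2 => h e (by omega) (by push_cast at he2 ⊢; omega))

theorem pyFirstDiv_some_of : ∀ (fuel : Nat) (n i d : Int),
    i ≤ d → d < i + fuel → PySem.Int.mod n d = 0 →
    (∀ e, i ≤ e → e < d → PySem.Int.mod n e ≠ 0) →
    pyFirstDiv n i fuel = some d := by
  intro fuel
  induction fuel with
  | zero => intro n i d h1 h2 _ _; exfalso; push_cast at h2; omega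
  | succ f ih =>
    intro n i d h1 h2 h3 h4
    simp only [pyFirstDiv]
    by_cases hi : PySem.Int.mod n i = 0
    · have hid : i = d := by
        by_contra hne
        exact h4 i (le_refl _) (lt_of_le_of_ne h1 hne) hi
      rw [if_pos hi, hid]
    · rw [if_neg hi]
      refine ih n (i + 1) d ?_ (by push_cast at h2 ⊢; omega) h3
        (fun e he1 he2 => h4 e (by omega) he2)
      rcases lt_or_eq_of_le h1 with h | h
      · omega
      · exact absurd (h ▸ h3) hi

theorem quot_eq {m e : Int} (he : e ≠ 0) (c : Int) (hc : m = e * c) : m / e = c := by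
  rw [hc]; exact Int.mul_ediv_cancel_left c he

-- accumulator lemma: disassembleA appends its factor list after 'found'
theorem dis_len : ∀ (k : Nat) (n : Int), n.toNat ≤ k →
    ∀ found, (disassembleA n found).length = found.length + (disassembleA n []).length := by
  intro k
  induction k with
  | zero =>
    intro n hn found
    have hfuel : (n - 2).toNat = 0 := by omega
    have hnone : pyFirstDiv n 2 (n - 2).toNat = none := by rw [hfuel]; rfl
    rw [disA_none hnone, disA_none hnone]
    simp
  | succ k ih =>
    intro n hn found
    cases h : pyFirstDiv n 2 (n - 2).toNat with
    | none => rw [disA_none h, disA_none h]; simp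
    | some i =>
      obtain ⟨hn3, hi2, hin, hfl, hq1, hq2⟩ := step_bounds h
      have hlt : (PySem.Int.floordiv n i).toNat ≤ k := by rw [hfl]; omega
      rw [disA_some h, disA_some h, ih _ hlt (found ++ [i]), ih _ hlt ([] ++ [i])]
      simp
      omega

-- a number with no divisor in [2, d) and m < d*d has no divisor in [2, m) at all: A appends just [m]
theorem disA_prime {m d : Int} (hm : 2 ≤ m) (hd : 2 ≤ d) (hgt : ¬ d * d ≤ m)
    (hnd : ∀ e, 2 ≤ e → e < d → ¬ (e ∣ m)) : disassembleA m [] = [m] := by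
  have hnone : pyFirstDiv m 2 (m - 2).toNat = none := by
    apply pyFirstDiv_none_of
    intro e he1 he2 hmod
    have he2' : e < m := by push_cast at he2; omega
    have hedvd : e ∣ m := (PySem.Int.mod_eq_zero_iff_dvd m e).mp hmod
    have hed : d ≤ e := by
      by_contra hc; exact hnd e he1 (by omega) hedvd
    obtain ⟨c, hc⟩ := hedvd
    have hc1 : 1 ≤ c := by nlinarith
    have hc2 : 2 ≤ c := by
      by_contra hcc
      have : c = 1 := by omega
      nlinarith
    have hcd : c < d := by nlinarith
    exact hnd c hc2 hcd ⟨e, by rw [hc]; ring⟩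
  rw [disA_none hnone]
  rfl

-- main invariant: with sufficient fuel and 'no divisor of m below d',
-- B's loop counts exactly A's factor-list length minus one
theorem bLoopF_eq : ∀ (f : Nat) (m d : Int), (m + 1 - d).toNat < f → 2 ≤ m →
    2 ≤ d → (∀ e, 2 ≤ e → e < d → ¬ (e ∣ m)) →
    ∀ cnt, bLoopF f m d cnt = cnt + ((disassembleA m []).length : Int) - 1 := by
  intro f
  induction f with
  | zero => intro m d hk _ _ _ _; omega
  | succ f ih =>
    intro m d hk hm hd hnd cnt
    simp only [bLoopF]
    by_cases hle : d * d ≤ m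
    · rw [if_pos hle]
      have hdm : d < m := by nlinarith
      by_cases hdvd : PySem.Int.mod m d = 0
      · rw [if_pos hdvd]
        have hdvd' : d ∣ m := (PySem.Int.mod_eq_zero_iff_dvd m d).mp hdvd
        -- d is the smallest divisor, so A's first step picks d
        have hfirst : pyFirstDiv m 2 (m - 2).toNat = some d :=
          pyFirstDiv_some_of _ m 2 d hd (by push_cast; omega) hdvd
            (fun e he1 he2 hmod =>
              hnd e he1 he2 ((PySem.Int.mod_eq_zero_iff_dvd m e).mp hmod))
        obtain ⟨c, hc⟩ := hdvd'
        have hq : m / d = c := quot_eq (by omega) c hc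
        have hq2 : 2 ≤ m / d := by rw [hq]; nlinarith
        have hfl : PySem.Int.floordiv m d = m / d :=
          PySem.Int.floordiv_eq_ediv_of_pos (by omega)
        have hqlt : m / d < m := (quot_bounds hm hd hdm ⟨c, hc⟩).2
        have hqdvd : (m / d) ∣ m := ⟨d, by rw [hq, hc]; ring⟩
        have hih := ih (m / d) d (by omega) hq2 hd
          (fun e he1 he2 hedvd => hnd e he1 he2 (hedvd.trans hqdvd)) (cnt + 1)
        rw [hfl, hih]
        -- relate lengths: disassembleA m [] = disassembleA (m/d) [d]
        have hA : (disassembleA m []).length = 1 + (disassembleA (m / d) []).length := by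
          rw [disA_some hfirst, hfl]
          have := dis_len (m / d).toNat (m / d) (le_refl _) ([] ++ [d])
          simpa using this
        rw [hA]; push_cast; ring
      · rw [if_neg hdvd]
        exact ih m (d + 1) (by omega) hm (by omega)
          (fun e he1 he2 hedvd => by
            rcases lt_or_eq_of_le (by omega : e ≤ d) with h | h
            · exact hnd e he1 h hedvd
            · exact hdvd ((PySem.Int.mod_eq_zero_iff_dvd m d).mpr (h ▸ hedvd))) cnt
    · rw [if_neg hle, disA_prime hm hd hle hnd]
      simp

-- per-item equality
theorem item_eq (n : Int) : ((disassembleA n []).length : Int) = cntB n := by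
  unfold cntB
  by_cases hn : n < 2
  · rw [if_pos hn]
    have hnone : pyFirstDiv n 2 (n - 2).toNat = none := by
      have h0 : (n - 2).toNat = 0 := by omega
      rw [h0]; rfl
    rw [disA_none hnone]
    rfl
  · rw [if_neg hn]
    push_neg at hn
    rw [bLoopF_eq ((n - 1).toNat + 1) n 2 (by omega) hn (by omega)
      (fun e he1 he2 _ => by omega) 0]
    ring

-- ===== VERDICT (by name: the statement is the Claim_ definition above) =====
theorem get_max_divisors_spec : Claim_equal_get_max_divisors := by
  intro from_list _
  unfold Spec_get_max_divisors get_max_divisors get_max_divisors_alt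
  congr 1
  funext acc item
  simp only [item_eq]
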